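-- pv_equiv track=rewrite | github.com/GRHun/SBoxDetection | get_all_bflc.py | get_all_bflc
-- ===== SOURCE A (Python) =====
-- def get_all_bflc(S, N, M):
--     """返回S盒坐标函数的所有非零线性组合
--     """
--     n = 2 ** M
--     result=[]
--     # todo: 就是说可以在直接用size吗？为啥设置一个n
--     for i in range(1,n):
--         booleanfunc_a = []
--         for j in range(len(S)):
--             # todo: 看到报告里伪代码是1，修改了，不知是否有影响
--             if(bin(i&S[j]).count("1")) % 2 ==1:
--                 booleanfunc_a.append(0)
--             else:
--                 booleanfunc_a.append(1)
--         result.append(booleanfunc_a)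
--     return result
-- ===== SOURCE B (Python) =====
-- def get_all_bflc(S, N, M):
--     """DP on the low set bit: row(i) = row(i - lowbit(i)) XOR the column of
--     bit k of S, instead of recomputing a popcount parity per entry."""
--     n = 2 ** M
--     cols = [[(s >> k) & 1 for s in S] for k in range(M)]
--     rows = [[1] * len(S)]  # rows[i][j] = 1 - (popcount(i & S[j]) % 2)
--     for i in range(1, n):
--         j, k = i, 0
--         while j & 1 == 0:  # k = number of trailing zeros of i
--             j >>= 1
--             k += 1
--         prev = rows[i - (1 << k)]
--         rows.append([p ^ b for p, b in zip(prev, cols[k])])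
--     return rows[1:]
-- ===== Notes on version B (the rewrite author's own statement) =====
-- stated objective: alternative
-- what changed: Instead of recomputing the popcount parity of i & S[j] for every i and j, B precomputes the bit columns of S and builds each row i by XOR-ing the already-built row for i - lowbit(i) with one column, so each output entry costs O(1) amortized instead of an O(M) popcount.
import Mathlib
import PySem

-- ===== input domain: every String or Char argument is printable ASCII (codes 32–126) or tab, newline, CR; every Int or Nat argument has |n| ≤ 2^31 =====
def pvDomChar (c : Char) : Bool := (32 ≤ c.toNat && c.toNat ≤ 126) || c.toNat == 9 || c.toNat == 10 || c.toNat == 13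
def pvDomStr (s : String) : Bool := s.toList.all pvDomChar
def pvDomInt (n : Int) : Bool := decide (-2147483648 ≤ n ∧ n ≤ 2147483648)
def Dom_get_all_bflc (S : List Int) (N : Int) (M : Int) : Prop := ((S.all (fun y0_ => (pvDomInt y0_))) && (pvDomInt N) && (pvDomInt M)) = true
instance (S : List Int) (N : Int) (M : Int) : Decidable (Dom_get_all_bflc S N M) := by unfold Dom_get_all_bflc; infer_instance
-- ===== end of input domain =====

-- B builds each row by XOR-ing the already-built row for i - lowbit(i) with one precomputed
-- bit column of S, instead of recomputing a popcount parity for every entry as A does.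

-- ===== PORT A =====
def get_all_bflc (S : List Int) (N : Int) (M : Int) : List (List Int) :=
  -- n = 2 ** M; for M < 0 Python's 2**M is a float and range(1, n) raises TypeError — excluded by Pre_
  let n : Int := 2 ^ M.toNat
  (PySem.List.pyRange 1 n).foldl (fun result i =>
    result ++ [(PySem.List.pyRange 0 (PySem.List.len S)).foldl (fun bf j =>
      bf ++ [if PySem.Int.bitCount (PySem.Int.band i (PySem.List.pyGetD S j 0)) % 2 = 1
             then (0 : Int) else 1]) []]) []

-- ===== PORT B =====
-- the inner 'while j & 1 == 0: j >>= 1; k += 1' loop; entered with j ≥ 1, so the j = 0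
-- branch (needed only for totality) is never taken
def pvTzLoop (j k : Nat) : Nat :=
  if j = 0 then k
  else if j % 2 = 0 then pvTzLoop (j / 2) (k + 1) else k
termination_by j
decreasing_by exact Nat.div_lt_self (by omega) (by omega)

-- one entry / one column of the precomputed table: (s >> k) & 1, [(s >> k) & 1 for s in S]
def pvColBit (k : Int) (s : Int) : Int := PySem.Int.band (s >>> k.toNat) 1
def pvCol (S : List Int) (k : Int) : List Int := S.map (pvColBit k)

def get_all_bflc_alt (S : List Int) (N : Int) (M : Int) : List (List Int) :=
  -- for M < 0, range(1, n) with n = 2**M a float raises TypeError, as in A — excluded by Pre_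
  let n : Int := 2 ^ M.toNat
  let cols : List (List Int) := (PySem.List.pyRange 0 M).map (pvCol S)
  let rows := (PySem.List.pyRange 1 n).foldl (fun rows i =>
    -- i ranges over range(1, n), so i ≥ 1 and i.toNat is exactly Python's j
    let k := pvTzLoop i.toNat 0
    let prev := PySem.List.pyGetD rows (i - ((1 : Int) <<< k)) []
    rows ++ [(prev.zip (PySem.List.pyGetD cols (k : Int) [])).map
      (fun pb => PySem.Int.bxor pb.1 pb.2)])
    [List.replicate S.length 1]
  rows.drop 1

-- ===== PRECONDITION & SPEC =====
-- Pre_ excludes exactly M < 0, where both Pythons raise TypeError (2**M is a float passed to range).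
def Pre_get_all_bflc (S : List Int) (N : Int) (M : Int) : Prop := 0 ≤ M
instance (S : List Int) (N : Int) (M : Int) : Decidable (Pre_get_all_bflc S N M) := by
  unfold Pre_get_all_bflc; infer_instance

def pvWitness_get_all_bflc : List Int × Int × Int := ([1, 2, 6], 0, 2)

def Spec_get_all_bflc (S : List Int) (N : Int) (M : Int) (out : List (List Int)) : Prop :=
  out = get_all_bflc_alt S N M
instance (S : List Int) (N : Int) (M : Int) (out : List (List Int)) : Decidable (Spec_get_all_bflc S N M out) := by
  unfold Spec_get_all_bflc; infer_instance

-- ===== CLAIM (what is proved, stated in full; the proofs are below) =====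
def Claim_equal_get_all_bflc : Prop := ∀ (S : List Int) (N : Int) (M : Int), Dom_get_all_bflc S N M → Pre_get_all_bflc S N M → Spec_get_all_bflc S N M (get_all_bflc S N M)

-- ===== LEMMAS AND PROOFS =====

-- pvBit s = low bit of s in Python's infinite two's complement, i.e. (s & 1)
def pvBit (s : Int) : Nat := (PySem.Int.band s 1).toNat

-- pvP a s = popcount(a & s) % 2, defined by halving recursion (the parity both programs compute)
def pvP : Nat → Int → Nat
  | 0, _ => 0
  | (a+1), s => ((a+1) % 2 * pvBit s + pvP ((a+1)/2) (s >>> (1:Nat))) % 2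
decreasing_by exact Nat.div_lt_self (Nat.succ_pos a) (by omega)

theorem pvShiftR_ofNat (m k : Nat) : (Int.ofNat m) >>> k = Int.ofNat (m >>> k) := rfl
theorem pvShiftR_negSucc (m k : Nat) : (Int.negSucc m) >>> k = Int.negSucc (m >>> k) := rfl
theorem pvShiftR_natCast (m k : Nat) : ((m : Int) >>> k) = ((m >>> k : Nat) : Int) := rfl

theorem pvShift_zero (s : Int) : s >>> (0 : Nat) = s := by cases s <;> rfl

theorem pvShift_shift (s : Int) (j k : Nat) : s >>> j >>> k = s >>> (j + k) := by
  cases s <;> simp only [pvShiftR_ofNat, pvShiftR_negSucc, Nat.shiftRight_add]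

theorem pvBit_lt_two (s : Int) : pvBit s < 2 := by
  unfold pvBit
  rw [PySem.Int.band_one]
  have h1 := PySem.Int.mod_nonneg s (b := 2) (by norm_num)
  have h2 := PySem.Int.mod_lt s (b := 2) (by norm_num)
  omega

theorem pvP_zero (s : Int) : pvP 0 s = 0 := by rw [pvP]

theorem pvP_eq (a : Nat) (s : Int) : pvP a s = (a % 2 * pvBit s + pvP (a/2) (s >>> (1:Nat))) % 2 := by
  cases a with
  | zero => simp [pvP]
  | succ a => rw [pvP]

theorem pvP_lt_two (a : Nat) (s : Int) : pvP a s < 2 := by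
  rw [pvP_eq]
  exact Nat.mod_lt _ (show 0 < 2 by omega)

-- Nat: parity of a bitwise AND is the product of the parities
theorem pvAnd_mod_two (a m : Nat) : (a &&& m) % 2 = a % 2 * (m % 2) := by
  rw [← Nat.and_one_is_mod (a &&& m), Nat.and_assoc, Nat.and_one_is_mod m]
  rcases Nat.mod_two_eq_zero_or_one m with h | h <;> rw [h]
  · simp
  · rw [Nat.and_one_is_mod]; omega

-- band with a negative right argument, unfolded (Python a & -(m+1) for a ≥ 0)
theorem pvBand_negSucc (a m : Nat) :
    PySem.Int.band (↑a) (Int.negSucc m) = ↑(a - (a &&& m)) := by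
  have h1 : ¬ (0 ≤ Int.negSucc m) := by omega
  have h2 : (-(Int.negSucc m) - 1).toNat = m := by
    rw [Int.negSucc_eq]; omega
  simp only [PySem.Int.band, h1, h2, if_false, if_pos (by omega : (0:Int) ≤ (a:Int))]
  simp

theorem pvBit_ofNat (m : Nat) : pvBit (Int.ofNat m) = m % 2 := by
  unfold pvBit
  have : (Int.ofNat m) = (↑m : Int) := rfl
  rw [this]
  have h1 : (1 : Int) = ((1 : Nat) : Int) := rfl
  rw [h1, PySem.Int.band_natCast, Int.toNat_natCast, Nat.and_one_is_mod]

theorem pvBit_negSucc (m : Nat) : pvBit (Int.negSucc m) = 1 - m % 2 := by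
  unfold pvBit
  rw [PySem.Int.band_one, PySem.Int.mod_eq_emod_of_pos (by norm_num)]
  rw [Int.negSucc_eq]
  omega

-- the two halving facts about band (mod-2 and floor-div-2), proved by sign cases
theorem pvBandMod (a : Nat) (s : Int) :
    (PySem.Int.mod (PySem.Int.band (↑a) s) 2).toNat = a % 2 * pvBit s := by
  cases s with
  | ofNat m =>
    have : (Int.ofNat m) = (↑m : Int) := rfl
    rw [this, PySem.Int.band_natCast]
    rw [show ((2:Int) = ((2:Nat):Int)) from rfl, PySem.Int.mod_natCast]
    rw [Int.toNat_natCast, pvAnd_mod_two]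
    rw [← this, pvBit_ofNat]
  | negSucc m =>
    rw [pvBand_negSucc, show ((2:Int) = ((2:Nat):Int)) from rfl, PySem.Int.mod_natCast,
        Int.toNat_natCast, pvBit_negSucc]
    have hd : a &&& m ≤ a := Nat.and_le_left
    have hp : (a &&& m) % 2 = a % 2 * (m % 2) := pvAnd_mod_two a m
    have h2 : m % 2 < 2 := Nat.mod_lt _ (by omega)
    have h3 : a % 2 < 2 := Nat.mod_lt _ (by omega)
    rcases Nat.mod_two_eq_zero_or_one m with h | h <;>
      rcases Nat.mod_two_eq_zero_or_one a with h' | h' <;>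
      rw [h] at hp ⊢ <;> rw [h'] at hp ⊢ <;> omega

theorem pvBandDiv (a : Nat) (s : Int) :
    PySem.Int.floordiv (PySem.Int.band (↑a) s) 2 = PySem.Int.band (↑(a/2)) (s >>> (1:Nat)) := by
  cases s with
  | ofNat m =>
    have : (Int.ofNat m) = (↑m : Int) := rfl
    rw [this, PySem.Int.band_natCast]
    rw [show ((2:Int) = ((2:Nat):Int)) from rfl, PySem.Int.floordiv_natCast]
    rw [pvShiftR_natCast, PySem.Int.band_natCast, Nat.shiftRight_one, Nat.and_div_two]
  | negSucc m =>
    rw [pvBand_negSucc, show ((2:Int) = ((2:Nat):Int)) from rfl, PySem.Int.floordiv_natCast]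
    rw [pvShiftR_negSucc, pvBand_negSucc]
    have hdd : (a / 2) &&& (m >>> 1) = (a &&& m) / 2 := by
      rw [Nat.shiftRight_one, Nat.and_div_two]
    rw [hdd]
    have hd : a &&& m ≤ a := Nat.and_le_left
    have hp : (a &&& m) % 2 = a % 2 * (m % 2) := pvAnd_mod_two a m
    have hple : (a &&& m) % 2 ≤ a % 2 := by
      have hm1 : m % 2 ≤ 1 := by omega
      rw [hp]
      simpa using Nat.mul_le_mul_left (a % 2) hm1
    congr 1
    omega

theorem pvBitCount_step (n : Int) (hn : 0 ≤ n) :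
    PySem.Int.bitCount n = (PySem.Int.mod n 2).toNat + PySem.Int.bitCount (PySem.Int.floordiv n 2) := by
  rcases eq_or_lt_of_le hn with h | h
  · rw [← h]
    rw [show ((0:Int) = ((0:Nat):Int)) from rfl, show ((2:Int) = ((2:Nat):Int)) from rfl,
        PySem.Int.mod_natCast, PySem.Int.floordiv_natCast]
    simp [PySem.Int.bitCount_zero]
  · exact PySem.Int.bitCount_of_pos h

-- A's quantity equals the halving parity pvP
theorem pvParA (a : Nat) : ∀ s : Int, PySem.Int.bitCount (PySem.Int.band (↑a) s) % 2 = pvP a s := by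
  induction a using Nat.strong_induction_on with
  | _ a ih =>
    intro s
    rcases Nat.eq_zero_or_pos a with h | h
    · subst h
      rw [show ((↑(0:Nat) : Int) = 0) from rfl, PySem.Int.band_comm, PySem.Int.band_zero,
          PySem.Int.bitCount_zero, pvP_zero]
    · have hn : 0 ≤ PySem.Int.band (↑a) s := PySem.Int.band_nonneg_of_nonneg_left s (by positivity)
      rw [pvBitCount_step _ hn, pvBandMod, pvBandDiv]
      have hih := ih (a / 2) (Nat.div_lt_self h (by omega)) (s >>> (1:Nat))
      rw [pvP_eq a s]
      generalize a % 2 * pvBit s = x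
      omega

-- adding a 2^k whose bit is free in a flips the parity by bit k of s
theorem pvParAdd (k : Nat) : ∀ (a : Nat) (s : Int), (a / 2^k) % 2 = 0 →
    pvP (a + 2^k) s = (pvP a s + pvBit (s >>> k)) % 2 := by
  induction k with
  | zero =>
    intro a s ha
    simp only [pow_zero, Nat.div_one] at ha
    simp only [pow_zero]
    rw [pvP_eq (a + 1) s, pvP_eq a s, pvShift_zero]
    have hm : (a + 1) % 2 = 1 := by omega
    have hd : (a + 1) / 2 = a / 2 := by omega
    rw [hm, hd]
    have hb := pvBit_lt_two s
    have hp := pvP_lt_two (a/2) (s >>> (1:Nat))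
    generalize pvP (a/2) (s >>> (1:Nat)) = y at *
    rw [show a % 2 = 0 from by omega]
    omega
  | succ k ih =>
    intro a s ha
    have h2p : 2^(k+1) = 2 * 2^k := by ring
    rw [pvP_eq (a + 2^(k+1)) s, pvP_eq a s]
    have hm2 : (a + 2^(k+1)) % 2 = a % 2 := by omega
    have hd2 : (a + 2^(k+1)) / 2 = a / 2 + 2^k := by omega
    rw [hm2, hd2]
    have hcond : ((a / 2) / 2^k) % 2 = 0 := by
      rw [Nat.div_div_eq_div_mul, ← pow_succ']
      exact ha
    rw [ih (a/2) (s >>> (1:Nat)) hcond, pvShift_shift]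
    rw [show 1 + k = k + 1 from by omega]
    have hb := pvBit_lt_two (s >>> (k+1))
    generalize a % 2 * pvBit s = x
    generalize pvP (a/2) (s >>> (1:Nat)) = y
    omega

theorem pvBxor_bits (x y : Nat) (hx : x < 2) (hy : y < 2) :
    PySem.Int.bxor (↑x) (↑y) = ↑((x + y) % 2) := by
  interval_cases x <;> interval_cases y <;> decide

-- band (s >>> k) 1 is the Int form of pvBit (s >>> k)
theorem pvBand_one_eq_bit (t : Int) : PySem.Int.band t 1 = ↑(pvBit t) := by
  unfold pvBit
  rw [PySem.Int.band_one]
  have h1 := PySem.Int.mod_nonneg t (b := 2) (by norm_num)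
  omega

-- one unfolding of the while loop
theorem pvTzLoop_eq (j k : Nat) : pvTzLoop j k =
    if j = 0 then k else if j % 2 = 0 then pvTzLoop (j / 2) (k + 1) else k := by
  rw [pvTzLoop]

-- the k-accumulator of the while loop is additive
theorem pvTzLoop_add (j : Nat) : ∀ k, pvTzLoop j k = k + pvTzLoop j 0 := by
  induction j using Nat.strong_induction_on with
  | _ j ih =>
    intro k
    rw [pvTzLoop_eq j k, pvTzLoop_eq j 0]
    split_ifs with h1 h2
    · omega
    · have hlt : j / 2 < j := Nat.div_lt_self (by omega) (by omega)
      rw [ih (j/2) hlt (k+1), ih (j/2) hlt 1]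
      omega
    · omega

-- the while loop computes trailing zeros: 2^k divides j and j / 2^k is odd
theorem pvTzLoop_spec (j : Nat) (hj : 0 < j) :
    j % 2 ^ (pvTzLoop j 0) = 0 ∧ (j / 2 ^ (pvTzLoop j 0)) % 2 = 1 := by
  induction j using Nat.strong_induction_on with
  | _ j ih =>
    by_cases he : j % 2 = 0
    · have hstep : pvTzLoop j 0 = 1 + pvTzLoop (j/2) 0 := by
        rw [pvTzLoop_eq]
        simp only [if_neg (by omega : ¬ j = 0), if_pos he]
        exact pvTzLoop_add (j/2) 1
      have hlt : j / 2 < j := Nat.div_lt_self hj (by omega)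
      have hpos : 0 < j / 2 := by omega
      obtain ⟨h1, h2⟩ := ih (j/2) hlt hpos
      rw [hstep, pow_add 2 1, pow_one]
      constructor
      · obtain ⟨q, hq⟩ := Nat.dvd_of_mod_eq_zero h1
        have hdvd' : 2 * 2 ^ pvTzLoop (j/2) 0 ∣ j :=
          ⟨q, by rw [Nat.mul_assoc, ← hq]; omega⟩
        exact Nat.mod_eq_zero_of_dvd hdvd'
      · rw [← Nat.div_div_eq_div_mul]
        exact h2
    · have hstep : pvTzLoop j 0 = 0 := by
        rw [pvTzLoop_eq]
        simp only [if_neg (by omega : ¬ j = 0), if_neg he]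
      rw [hstep]
      simp
      omega

-- characterization of port A as a map
theorem pvA_char (S : List Int) (N M : Int) :
    get_all_bflc S N M = (PySem.List.pyRange 1 ((2:Int) ^ M.toNat)).map
      (fun i => S.map (fun s =>
        if PySem.Int.bitCount (PySem.Int.band i s) % 2 = 1 then (0:Int) else 1)) := by
  unfold get_all_bflc
  rw [PySem.List.foldl_append_singleton_eq_map]
  rw [List.nil_append]
  congr 1
  funext i
  rw [PySem.List.foldl_append_singleton_eq_map, List.nil_append]
  have : (fun j => if PySem.Int.bitCount (PySem.Int.band i (PySem.List.pyGetD S j 0)) % 2 = 1 then (0:Int) else 1)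
       = (fun s => if PySem.Int.bitCount (PySem.Int.band i s) % 2 = 1 then (0:Int) else 1) ∘
         (fun j => PySem.List.pyGetD S j 0) := rfl
  rw [this, ← List.map_map, PySem.List.map_pyGetD_pyRange_zero]

-- pyRange 1 n as a dropped Nat range
theorem pvPyRange_one (n : Nat) :
    PySem.List.pyRange 1 (↑n) = ((List.range n).drop 1).map (fun (k : Nat) => (k : Int)) := by
  rcases Nat.eq_zero_or_pos n with h | h
  · subst h; decide
  · have hc : (0:Int) < ↑n := by exact_mod_cast h
    have h1 := PySem.List.pyRange_one_cons (a := 0) (b := (↑n : Int)) hc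
    have h2 := PySem.List.pyRange_zero_natCast n
    rw [h2] at h1
    have h3 : (0:Int) + 1 = 1 := by ring
    rw [h3] at h1
    have h4 := congrArg List.tail h1
    rw [List.tail_cons] at h4
    rw [← h4, List.drop_one, List.map_tail]

-- one row of B's table / result row of A, as functions of the index
def pvRowT (S : List Int) (a : Nat) : List Int := S.map (fun s => (1 : Int) - ↑(pvP a s))

-- B's fold step applied to the correct table extends it correctly
theorem pvB_step (S : List Int) (M : Int) (m : Nat) (hM : M = (↑m : Int)) (t : Nat)
    (ht : 1 ≤ t) (htm : t < 2^m) :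
    ((List.range t).map (pvRowT S)) ++
      [((PySem.List.pyGetD ((List.range t).map (pvRowT S)) ((t : Int) - ((1 : Int) <<< (pvTzLoop t 0))) []).zip
        (PySem.List.pyGetD ((PySem.List.pyRange 0 M).map (pvCol S)) ((pvTzLoop t 0 : Nat) : Int) [])).map
        (fun pb => PySem.Int.bxor pb.1 pb.2)]
    = (List.range (t+1)).map (pvRowT S) := by
  obtain ⟨hdvd, hodd⟩ := pvTzLoop_spec t (by omega)
  set k := pvTzLoop t 0 with hk
  have h2k : 2^k ≤ t := by
    by_contra h
    have : t / 2^k = 0 := Nat.div_eq_of_lt (by omega)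
    omega
  have hkm : k < m := by
    have : 2^k < 2^m := by omega
    exact (Nat.pow_lt_pow_iff_right (by omega)).mp this
  -- the shift: (1 : Int) <<< k = ((2^k : Nat) : Int)
  have hshift : ((1 : Int) <<< k) = ((2^k : Nat) : Int) := by
    rw [show ((1:Int)) = ((1:Nat):Int) from rfl, ← Int.natCast_shiftLeft]
    norm_num [Nat.shiftLeft_eq]
  -- table lookup
  have hidx : ((t : Int) - ((1 : Int) <<< k)) = ((t - 2^k : Nat) : Int) := by
    rw [hshift]; omega
  have hlen : t - 2^k < ((List.range t).map (pvRowT S)).length := by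
    simp; omega
  have hprev : PySem.List.pyGetD ((List.range t).map (pvRowT S)) ((t : Int) - ((1 : Int) <<< k)) []
      = pvRowT S (t - 2^k) := by
    rw [hidx, PySem.List.pyGetD_natCast]
    rw [List.getD_eq_getElem _ _ hlen]
    simp [List.length_range]
  -- cols lookup
  have hcols : PySem.List.pyGetD ((PySem.List.pyRange 0 M).map (pvCol S)) ((k : Nat) : Int) []
      = S.map (pvColBit ((k : Nat) : Int)) := by
    subst hM
    rw [PySem.List.pyGetD_map_pyRange_of_nonneg (pvCol S) (↑m) ((k : Nat) : Int) []
      (by positivity) (by exact_mod_cast hkm)]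
    rfl
  rw [hprev, hcols, List.range_succ, List.map_append]
  simp only [List.map_cons, List.map_nil, List.append_cancel_left_eq]
  congr 1
  -- the zipped xor row equals pvRowT S t
  unfold pvRowT
  rw [List.zip_map', List.map_map]
  apply List.map_congr_left
  intro s _
  simp only [Function.comp_apply, pvColBit, Int.toNat_natCast]
  rw [pvBand_one_eq_bit]
  -- rewrite 1 - pvP as a Nat cast and compute the xor
  have hq := pvP_lt_two (t - 2^k) s
  have hb := pvBit_lt_two (s >>> k)
  have hcast : (1 : Int) - ↑(pvP (t - 2^k) s) = ((1 - pvP (t - 2^k) s : Nat) : Int) := by omega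
  rw [hcast, pvBxor_bits _ _ (by omega) hb]
  -- parity step
  have hcond : ((t - 2^k) / 2^k) % 2 = 0 := by
    obtain ⟨q, hq⟩ := Nat.dvd_of_mod_eq_zero hdvd
    have hpk : 0 < 2^k := by positivity
    have h1 : t / 2^k = q := by rw [hq]; exact Nat.mul_div_cancel_left q hpk
    have hsub : t - 2^k = 2^k * (q - 1) := by
      rw [hq, Nat.mul_sub, Nat.mul_one]
    have h2 : (t - 2^k) / 2^k = q - 1 := by
      rw [hsub]; exact Nat.mul_div_cancel_left _ hpk
    rw [h1] at hodd
    rw [h2]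
    omega
  have hstep := pvParAdd k (t - 2^k) s hcond
  rw [show t - 2^k + 2^k = t from by omega] at hstep
  have hpt := pvP_lt_two t s
  rw [hstep]
  generalize pvP (t - 2^k) s = q at *
  interval_cases q <;> interval_cases h : pvBit (s >>> k) <;> norm_num

-- characterization of port B as a map
theorem pvB_char (S : List Int) (N M : Int) (m : Nat) (hM : M = (↑m : Int)) :
    get_all_bflc_alt S N M = ((List.range (2 ^ m)).drop 1).map (pvRowT S) := by
  have hM' : M.toNat = m := by omega
  simp only [get_all_bflc_alt, hM']
  rw [show ((2:Int) ^ m = ((2 ^ m : Nat) : Int)) from by push_cast; ring]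
  rw [pvPyRange_one]
  -- prove the fold invariant for every prefix length t with 1 ≤ t ≤ 2^m
  suffices h : ∀ t : Nat, 1 ≤ t → t ≤ 2^m →
      (((List.range t).drop 1).map (fun (x : Nat) => (x : Int))).foldl
        (fun rows i =>
          rows ++ [((PySem.List.pyGetD rows (i - ((1 : Int) <<< (pvTzLoop i.toNat 0))) []).zip
            (PySem.List.pyGetD ((PySem.List.pyRange 0 M).map (pvCol S)) ((pvTzLoop i.toNat 0 : Nat) : Int) [])).map
            (fun pb => PySem.Int.bxor pb.1 pb.2)])
        [List.replicate S.length 1]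
      = (List.range t).map (pvRowT S) by
    have h1 : (1:Nat) ≤ 2^m := Nat.one_le_two_pow
    rw [h (2^m) h1 le_rfl, ← List.map_drop]
  intro t
  induction t with
  | zero => omega
  | succ t ih =>
    intro _ hle
    rcases Nat.eq_zero_or_pos t with h0 | h0
    · subst h0
      simp only [List.range_succ, List.range_zero, List.nil_append, List.drop_one,
        List.tail_cons, List.map_nil, List.foldl_nil, List.map_cons]
      congr 1
      unfold pvRowT
      simp [pvP_zero]
    · have hih := ih h0 (by omega)
      rw [List.range_succ, List.drop_append_of_le_length (by simp; omega), List.map_append,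
        List.foldl_append, hih]
      simp only [List.map_cons, List.map_nil, List.foldl_cons, List.foldl_nil]
      have htoNat : ((t : Int)).toNat = t := by omega
      rw [htoNat]
      have hstep := pvB_step S M m hM t h0 (by omega)
      rw [List.range_succ] at hstep
      exact hstep

-- ===== VERDICT (by name: the statement is the Claim_ definition above) =====
theorem get_all_bflc_spec : Claim_equal_get_all_bflc := by
  intro S N M _ hpre
  unfold Spec_get_all_bflc
  have h0 : (0:Int) ≤ M := hpre
  rw [pvA_char, pvB_char S N M M.toNat (by omega)]
  rw [show ((2:Int) ^ M.toNat = ((2 ^ M.toNat : Nat) : Int)) from by push_cast; ring]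
  rw [pvPyRange_one, List.map_map]
  apply List.map_congr_left
  intro k _
  simp only [Function.comp_apply]
  unfold pvRowT
  apply List.map_congr_left
  intro s _
  rw [pvParA k s]
  have := pvP_lt_two k s
  interval_cases h : pvP k s <;> norm_num
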